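-- pv_equiv track=rewrite | github.com/Annelies-H/AdventOfCode2023 | day01.py | get_indexed_numbers
-- ===== SOURCE A (Python) =====
-- NUMBERS = {
--     "one": "1",
--     "two": "2",
--     "three": "3",
--     "four": "4",
--     "five": "5",
--     "six": "6",
--     "seven": "7",
--     "eight": "8",
--     "nine": "9",
--     "1": "1",
--     "2": "2",
--     "3": "3",
--     "4": "4",
--     "5": "5",
--     "6": "6",
--     "7": "7",
--     "8": "8",
--     "9": "9",
-- }
--
-- def get_indexed_numbers(line: str) -> list():
--     numbers = {}
--     for number in NUMBERS.keys():
--         index = line.find(number)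
--         if not index == -1:
--             numbers[index] = NUMBERS[number]
--             # repeat to get last ocurence as well
--             rindex = line.rfind(number)
--             if not rindex == -1:
--                 numbers[rindex] = NUMBERS[number]
--     return sorted(numbers.items())
-- ===== SOURCE B (Python) =====
-- NUMBERS = {
--     "one": "1",
--     "two": "2",
--     "three": "3",
--     "four": "4",
--     "five": "5",
--     "six": "6",
--     "seven": "7",
--     "eight": "8",
--     "nine": "9",
--     "1": "1",
--     "2": "2",
--     "3": "3",
--     "4": "4",
--     "5": "5",
--     "6": "6",
--     "7": "7",
--     "8": "8",
--     "9": "9",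
-- }
--
--
-- def get_indexed_numbers(line: str) -> list():
--     # One forward pass over the positions of the line: at each position try every
--     # token and record, per token, its first and last starting index.
--     first = {}
--     last = {}
--     for i in range(len(line)):
--         for tok in NUMBERS:
--             if line.startswith(tok, i):
--                 if tok not in first:
--                     first[tok] = i
--                 last[tok] = i
--     numbers = {}
--     for tok, digit in NUMBERS.items():
--         if tok in first:
--             numbers[first[tok]] = digit
--             numbers[last[tok]] = digit
--     return sorted(numbers.items())
-- ===== Notes on version B (the rewrite author's own statement) =====
-- stated objective: alternative
-- what changed: Instead of calling line.find and line.rfind once per token (18 substring searches), B makes a single forward pass over the positions of the line, recording for every token its first and last starting index with startswith, and then builds the index-to-digit dict from those tables.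
import Mathlib
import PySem

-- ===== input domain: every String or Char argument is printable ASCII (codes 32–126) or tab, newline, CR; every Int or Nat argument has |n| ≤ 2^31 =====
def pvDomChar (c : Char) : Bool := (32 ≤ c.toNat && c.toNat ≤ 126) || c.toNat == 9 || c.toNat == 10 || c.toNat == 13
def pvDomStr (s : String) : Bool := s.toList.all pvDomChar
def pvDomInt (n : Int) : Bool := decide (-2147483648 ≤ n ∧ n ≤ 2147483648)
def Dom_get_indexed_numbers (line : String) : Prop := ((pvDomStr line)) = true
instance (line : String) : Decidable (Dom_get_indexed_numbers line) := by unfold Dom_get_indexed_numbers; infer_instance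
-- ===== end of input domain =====

-- B replaces A's per-token find/rfind library scans by ONE forward pass over the line's
-- positions recording each token's first and last starting index (objective: alternative).

-- the module-level NUMBERS dict, shared by both ports
def pvNUMBERSlist : List (String × String) :=
  [("one","1"),("two","2"),("three","3"),("four","4"),("five","5"),("six","6"),
   ("seven","7"),("eight","8"),("nine","9"),
   ("1","1"),("2","2"),("3","3"),("4","4"),("5","5"),("6","6"),("7","7"),("8","8"),("9","9")]

def pvNUMBERS : PySem.Dict String String := PySem.Dict.ofList pvNUMBERSlist

-- ===== PORT A =====
def get_indexed_numbers (line : String) : List (Int × String) :=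
  let numbers : PySem.Dict Int String :=
    (pvNUMBERS.keys).foldl (init := PySem.Dict.empty) (fun nums number =>
      let index := PySem.Str.find line number
      if index ≠ -1 then
        -- NUMBERS[number]: 'number' comes from NUMBERS.keys(), so the KeyError case is unreachable
        let nums1 := nums.insert index (pvNUMBERS.getD number "")
        let rindex := PySem.Str.rfind line number
        if rindex ≠ -1 then nums1.insert rindex (pvNUMBERS.getD number "") else nums1
      else nums)
  PySem.List.sorted2 numbers.items Prod.fst Prod.snd

-- ===== PORT B =====
-- B's inner loop body: try token td at position i, updating the (first, last) tables
def pvTokStep (l : List Char) (i : Int)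
    (st2 : PySem.Dict String Int × PySem.Dict String Int) (td : String × String) :
    PySem.Dict String Int × PySem.Dict String Int :=
  -- line.startswith(tok, i): i comes from range(len(line)), so 0 ≤ i and the drop is exact
  if PySem.Chars.startswith (l.drop i.toNat) td.1.toList then
    ((if st2.1.contains td.1 then st2.1 else st2.1.insert td.1 i), st2.2.insert td.1 i)
  else st2

-- B's outer loop body: one position of the single pass
def pvScanStep (l : List Char)
    (st : PySem.Dict String Int × PySem.Dict String Int) (i : Int) :
    PySem.Dict String Int × PySem.Dict String Int :=
  pvNUMBERSlist.foldl (pvTokStep l i) st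

def get_indexed_numbers_alt (line : String) : List (Int × String) :=
  let fl :=
    (PySem.List.pyRange 0 (PySem.Str.len line) 1).foldl (pvScanStep line.toList)
      (PySem.Dict.empty, PySem.Dict.empty)
  let numbers : PySem.Dict Int String :=
    pvNUMBERSlist.foldl (init := PySem.Dict.empty) (fun nums td =>
      if fl.1.contains td.1 then
        -- first[tok] / last[tok]: guarded by 'tok in first', so the KeyError case is unreachable
        (nums.insert (fl.1.getD td.1 0) td.2).insert (fl.2.getD td.1 0) td.2
      else nums)
  PySem.List.sorted2 numbers.items Prod.fst Prod.snd

-- ===== PRECONDITION & SPEC =====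
def Spec_get_indexed_numbers (line : String) (out : List (Int × String)) : Prop := out = get_indexed_numbers_alt line
instance (line : String) (out : List (Int × String)) : Decidable (Spec_get_indexed_numbers line out) := by unfold Spec_get_indexed_numbers; infer_instance

-- ===== CLAIM (what is proved, stated in full; the proofs are below) =====
def Claim_equal_get_indexed_numbers : Prop := ∀ (line : String), Dom_get_indexed_numbers line → Spec_get_indexed_numbers line (get_indexed_numbers line)

-- ===== LEMMAS AND PROOFS =====

-- 'token tt starts at position j of l'
def pvProp (l tt : List Char) (j : Nat) : Bool := tt.isPrefixOf (l.drop j)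

-- all starting positions of tt in l, in increasing order
def pvM (l tt : List Char) : List Nat := (List.range l.length).filter (pvProp l tt)

theorem pv_mem_M {l tt : List Char} {j : Nat} :
    j ∈ pvM l tt ↔ j < l.length ∧ pvProp l tt j = true := by
  simp [pvM, List.mem_filter, List.mem_range]

theorem pv_prop_lt {l tt : List Char} {j : Nat} (htt : tt ≠ [])
    (h : pvProp l tt j = true) : j < l.length := by
  rw [pvProp, List.isPrefixOf_iff_prefix] at h
  have hlen := h.length_le
  simp [List.length_drop] at hlen
  have : 0 < tt.length := List.length_pos_iff.mpr htt
  omega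

-- A's line.find(tok) is the head of the occurrence list
theorem pv_find_char (l : List Char) {tt : List Char} (htt : tt ≠ []) :
    PySem.Chars.find l tt = ((pvM l tt).head?.map (Nat.cast : Nat → Int)).getD (-1) := by
  have hiff : (∃ j, tt <+: l.drop j) ↔ tt <:+: l := by
    rw [PySem.Chars.exists_prefix_drop_iff_isIn, PySem.Chars.isIn_iff_infix]
  cases hM : pvM l tt with
  | nil =>
    have : ¬ tt <:+: l := by
      intro hin
      obtain ⟨j, hj⟩ := hiff.mpr hin
      have hp : pvProp l tt j = true := by rw [pvProp, List.isPrefixOf_iff_prefix]; exact hj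
      have : j ∈ pvM l tt := pv_mem_M.mpr ⟨pv_prop_lt htt hp, hp⟩
      simp [hM] at this
    simp [(PySem.Chars.find_eq_neg_one_iff l tt).mpr this]
  | cons m rest =>
    have hmem : m ∈ pvM l tt := by simp [hM]
    obtain ⟨hmlt, hmp⟩ := pv_mem_M.mp hmem
    have hmpre : tt <+: l.drop m := List.isPrefixOf_iff_prefix.mp hmp
    have hnneg : 0 ≤ PySem.Chars.find l tt :=
      (PySem.Chars.find_nonneg_iff l tt).mpr (hiff.mp ⟨m, hmpre⟩)
    obtain ⟨hfp, hfmin⟩ := PySem.Chars.find_spec hnneg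
    set f := (PySem.Chars.find l tt).toNat with hf
    have hfle : PySem.Chars.find l tt ≤ (l.length : Int) := PySem.Chars.find_le_length l tt
    have hflt : f < l.length := pv_prop_lt htt (by rw [pvProp, List.isPrefixOf_iff_prefix]; exact hfp)
    have hfmem : f ∈ pvM l tt := pv_mem_M.mpr ⟨hflt, by rw [pvProp, List.isPrefixOf_iff_prefix]; exact hfp⟩
    have hsorted : (pvM l tt).Pairwise (· < ·) := List.Pairwise.filter _ List.pairwise_lt_range
    have hmle : m ≤ f := by
      rw [hM] at hsorted hfmem
      rcases List.mem_cons.mp hfmem with h | h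
      · omega
      · exact le_of_lt (List.rel_of_pairwise_cons hsorted h)
    have hle : f ≤ m := by
      by_contra hlt
      exact hfmin m (by omega) hmpre
    have : f = m := by omega
    simp only [List.head?_cons, Option.map_some, Option.getD_some]
    omega

-- A's line.rfind(tok): the scan from the top is the last occurrence ≤ the bound
theorem pv_rfind_go (l tt : List Char) (k : Nat) :
    PySem.Chars.rfind.go l tt k =
      ((((List.range (k+1)).filter (pvProp l tt)).getLast?.map (Nat.cast : Nat → Int)).getD (-1)) := by
  induction k with
  | zero =>
    rw [PySem.Chars.rfind.go.eq_def]
    simp [List.range_succ, pvProp]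
    split_ifs <;> rfl
  | succ j ih =>
    rw [PySem.Chars.rfind.go.eq_def]
    have hr : List.range (j+1+1) = List.range (j+1) ++ [j+1] := List.range_succ
    rw [hr, List.filter_append]
    by_cases hp : pvProp l tt (j+1) = true
    · simp only [pvProp] at hp
      simp [hp, pvProp]
    · simp only [pvProp] at hp
      simp only [Bool.not_eq_true] at hp
      simp [hp, pvProp, ih]

theorem pv_rfind_char (l : List Char) {tt : List Char} (htt : tt ≠ []) :
    PySem.Chars.rfind l tt = ((pvM l tt).getLast?.map (Nat.cast : Nat → Int)).getD (-1) := by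
  show PySem.Chars.rfind.go l tt l.length = _
  rw [pv_rfind_go]
  have hplen : pvProp l tt l.length = false := by
    rw [pvProp]
    simp only [List.drop_length]
    cases tt with
    | nil => exact absurd rfl htt
    | cons a t => simp [List.isPrefixOf]
  have : (List.range (l.length + 1)).filter (pvProp l tt) = pvM l tt := by
    rw [List.range_succ, List.filter_append, pvM]
    simp [hplen]
  rw [this]

-- one token step of B leaves other tokens' entries untouched
theorem pv_tokstep_other (l : List Char) (i : Int)
    (st : PySem.Dict String Int × PySem.Dict String Int) (td : String × String)
    (t : String) (h : t ≠ td.1) :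
    (pvTokStep l i st td).1.get? t = st.1.get? t ∧
    (pvTokStep l i st td).2.get? t = st.2.get? t := by
  rw [pvTokStep]
  split_ifs with h1 h2 <;> simp [PySem.Dict.get?_insert, h]

theorem pv_tokfold_other (l : List Char) (i : Int) (ts : List (String × String))
    (st : PySem.Dict String Int × PySem.Dict String Int) (t : String)
    (h : t ∉ ts.map Prod.fst) :
    (ts.foldl (pvTokStep l i) st).1.get? t = st.1.get? t ∧
    (ts.foldl (pvTokStep l i) st).2.get? t = st.2.get? t := by
  induction ts generalizing st with
  | nil => exact ⟨rfl, rfl⟩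
  | cons td ts ih =>
    simp only [List.map_cons, List.mem_cons, not_or] at h
    obtain ⟨h1, h2⟩ := h
    simp only [List.foldl_cons]
    obtain ⟨e1, e2⟩ := pv_tokstep_other l i st td t h1
    obtain ⟨f1, f2⟩ := ih (pvTokStep l i st td) h2
    exact ⟨f1.trans e1, f2.trans e2⟩

-- projection of B's inner token loop at one token
theorem pv_tokfold_proj (l : List Char) (i : Int) (ts : List (String × String))
    (hnd : (ts.map Prod.fst).Nodup) (t : String) (ht : t ∈ ts.map Prod.fst)
    (st : PySem.Dict String Int × PySem.Dict String Int) :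
    (ts.foldl (pvTokStep l i) st).1.get? t =
      (if pvProp l t.toList i.toNat then (st.1.get? t).or (some i) else st.1.get? t) ∧
    (ts.foldl (pvTokStep l i) st).2.get? t =
      (if pvProp l t.toList i.toNat then some i else st.2.get? t) := by
  induction ts generalizing st with
  | nil => simp at ht
  | cons td ts ih =>
    simp only [List.map_cons, List.nodup_cons] at hnd
    obtain ⟨hnd1, hnd2⟩ := hnd
    simp only [List.foldl_cons]
    rw [List.map_cons] at ht
    rcases List.mem_cons.mp ht with heq | hmem
    · -- t is the head token; the tail leaves it untouched
      subst heq
      obtain ⟨f1, f2⟩ := pv_tokfold_other l i ts (pvTokStep l i st td) td.1 hnd1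
      rw [f1, f2, pvTokStep]
      have hsw : PySem.Chars.startswith (l.drop i.toNat) td.1.toList = pvProp l td.1.toList i.toNat := rfl
      rw [hsw]
      by_cases hp : pvProp l td.1.toList i.toNat = true
      · constructor
        · rw [PySem.Dict.contains_eq_isSome_get?]
          cases hg : st.1.get? td.1 with
          | none => simp [hp, PySem.Dict.get?_insert_self]
          | some v => simp [hp, hg]
        · simp [hp, PySem.Dict.get?_insert_self]
      · simp only [Bool.not_eq_true] at hp
        simp [hp]
    · -- t is in the tail
      have hne : t ≠ td.1 := by
        intro he; subst he; exact hnd1 hmem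
      obtain ⟨e1, e2⟩ := pv_tokstep_other l i st td t hne
      obtain ⟨f1, f2⟩ := ih hnd2 hmem (pvTokStep l i st td)
      rw [f1, f2, e1, e2]
      exact ⟨rfl, rfl⟩

-- projection of B's whole single pass at one token
theorem pv_scanfold_proj (l : List Char) (L : List Int) (t : String)
    (ht : t ∈ pvNUMBERSlist.map Prod.fst)
    (st : PySem.Dict String Int × PySem.Dict String Int) :
    (L.foldl (pvScanStep l) st).1.get? t =
      (st.1.get? t).or ((L.filter (fun i => pvProp l t.toList i.toNat)).head?) ∧
    (L.foldl (pvScanStep l) st).2.get? t =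
      ((L.filter (fun i => pvProp l t.toList i.toNat)).getLast?).or (st.2.get? t) := by
  induction L generalizing st with
  | nil => simp
  | cons i L ih =>
    have hnd : (pvNUMBERSlist.map Prod.fst).Nodup := by decide
    obtain ⟨e1, e2⟩ := pv_tokfold_proj l i pvNUMBERSlist hnd t ht st
    obtain ⟨f1, f2⟩ := ih (pvScanStep l st i)
    simp only [List.foldl_cons, List.filter_cons]
    have g1 : (pvScanStep l st i).1.get? t =
        (if pvProp l t.toList i.toNat then (st.1.get? t).or (some i) else st.1.get? t) := e1
    have g2 : (pvScanStep l st i).2.get? t =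
        (if pvProp l t.toList i.toNat then some i else st.2.get? t) := e2
    rw [f1, f2, g1, g2]
    by_cases hq : pvProp l t.toList i.toNat = true
    · simp only [hq, if_true]
      constructor
      · rw [List.head?_cons, Option.or_assoc, Option.some_or]
      · rw [List.getLast?_cons]
        cases hfl : (L.filter (fun i => pvProp l t.toList i.toNat)).getLast? with
        | none => simp
        | some y => simp
    · simp only [Bool.not_eq_true] at hq
      simp [hq]

-- B's first/last tables, read at a token, are head/last of the occurrence list
theorem pv_fl_get (line : String) (t : String) (ht : t ∈ pvNUMBERSlist.map Prod.fst) :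
    ((PySem.List.pyRange 0 (PySem.Str.len line) 1).foldl (pvScanStep line.toList)
        (PySem.Dict.empty, PySem.Dict.empty)).1.get? t
      = ((pvM line.toList t.toList).map (Nat.cast : Nat → Int)).head? ∧
    ((PySem.List.pyRange 0 (PySem.Str.len line) 1).foldl (pvScanStep line.toList)
        (PySem.Dict.empty, PySem.Dict.empty)).2.get? t
      = ((pvM line.toList t.toList).map (Nat.cast : Nat → Int)).getLast? := by
  obtain ⟨h1, h2⟩ := pv_scanfold_proj line.toList (PySem.List.pyRange 0 (PySem.Str.len line) 1) t ht
      (PySem.Dict.empty, PySem.Dict.empty)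
  have hrange : PySem.List.pyRange 0 (PySem.Str.len line) 1 =
      (List.range line.toList.length).map (Nat.cast : Nat → Int) := by
    rw [PySem.Str.len_eq]
    exact PySem.List.pyRange_zero_natCast _
  have hfilter : (PySem.List.pyRange 0 (PySem.Str.len line) 1).filter
      (fun i => pvProp line.toList t.toList i.toNat)
      = (pvM line.toList t.toList).map (Nat.cast : Nat → Int) := by
    rw [hrange, List.filter_map, pvM]
    have hc : ((fun i : Int => pvProp line.toList t.toList i.toNat) ∘ (Nat.cast : Nat → Int))
        = pvProp line.toList t.toList := by
      funext j
      simp [Function.comp, Int.toNat_natCast]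
    rw [hc]
  rw [hfilter] at h1 h2
  rw [h1, h2]
  constructor <;> simp [PySem.Dict.get?_empty]

-- ===== VERDICT (by name: the statement is the Claim_ definition above) =====
theorem get_indexed_numbers_spec : Claim_equal_get_indexed_numbers := by
  intro line _
  show get_indexed_numbers line = get_indexed_numbers_alt line
  simp only [get_indexed_numbers, get_indexed_numbers_alt]
  have hkeys : pvNUMBERS.keys = pvNUMBERSlist.map Prod.fst := by decide
  rw [hkeys, List.foldl_map]
  apply congrArg (fun d : PySem.Dict Int String => PySem.List.sorted2 d.items Prod.fst Prod.snd)
  apply PySem.List.foldl_congr_mem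
  intro nums td hmem
  have hfacts : ∀ td ∈ pvNUMBERSlist, td.1.toList ≠ [] ∧ pvNUMBERS.getD td.1 "" = td.2 := by decide
  obtain ⟨htt, hval⟩ := hfacts td hmem
  have ht : td.1 ∈ pvNUMBERSlist.map Prod.fst := List.mem_map_of_mem hmem
  obtain ⟨hfl1, hfl2⟩ := pv_fl_get line td.1 ht
  rw [PySem.Str.find_eq, PySem.Str.rfind_eq, pv_find_char line.toList htt, pv_rfind_char line.toList htt,
      hval]
  cases hM : pvM line.toList td.1.toList with
  | nil =>
    rw [hM] at hfl1
    simp only [List.head?_nil, List.getLast?_nil, Option.map_none, Option.getD_none]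
    rw [if_neg (by omega)]
    rw [PySem.Dict.contains_eq_isSome_get?, hfl1]
    simp
  | cons m rest =>
    rw [hM] at hfl1 hfl2
    rw [List.head?_map, List.head?_cons, Option.map_some] at hfl1
    rw [List.getLast?_map, List.getLast?_cons, Option.map_some] at hfl2
    simp only [List.head?_cons, List.getLast?_cons, Option.map_some, Option.getD_some]
    rw [if_pos (by omega : ((m : Nat) : Int) ≠ -1),
        if_pos (by omega : (((rest.getLast?.getD m) : Nat) : Int) ≠ -1)]
    rw [PySem.Dict.contains_eq_isSome_get?, hfl1]
    simp only [Option.isSome_some, if_true]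
    rw [PySem.Dict.getD_eq_get?_getD, PySem.Dict.getD_eq_get?_getD, hfl1, hfl2]
    rfl
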